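-- pv_equiv track=rewrite | github.com/blind-submission01/Code-for-anonymous-submission | 04_evaluation/01_prepare_eval_data.py | format_buggy_slice
-- ===== SOURCE A (Python) =====
-- def format_buggy_slice(processed_diff: str) -> str:
--     """
--     参考 format_segments 的逻辑，将处理后的 diff 格式化为 buggy_slice。
--     将每个文件路径及其内容组合成 segment 格式。
--     """
--     if not processed_diff.strip():
--         return ""
--
--     lines = processed_diff.splitlines()
--     segments = []
--     current_file = None
--     current_content = []
--
--     for line in lines:
--         # 判断是否是文件路径行（不以 - 或空格开头，且包含文件扩展名特征）
--         if not line.startswith("-") and not line.startswith(" ") and "/" in line: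
--             # 保存之前的 segment
--             if current_file is not None and current_content:
--                 segments.append({
--                     "file": current_file,
--                     "content": "\n".join(current_content)
--                 })
--             current_file = line
--             current_content = []
--         else:
--             current_content.append(line)
--
--     # 保存最后一个 segment
--     if current_file is not None and current_content:
--         segments.append({
--             "file": current_file,
--             "content": "\n".join(current_content)
--         })
--
--     # 格式化为类似 format_segments 的输出
--     output_lines = []
--     for idx, seg in enumerate(segments, start=1):
--         output_lines.append(f"--- Segment Group {idx} ---")
--         output_lines.append(f"[Suspicious] file: {seg['file']}")
--         output_lines.append("```")
--         output_lines.append(seg['content'].rstrip())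
--         output_lines.append("```")
--         output_lines.append("")
--
--     return "\n".join(output_lines)
-- ===== SOURCE B (Python) =====
-- def format_buggy_slice(processed_diff: str) -> str:
--     """Single streaming pass: build the formatted output directly, flushing each
--     file group as the next header line (or end of input) is reached."""
--     output_lines = []
--     idx = 0
--     current_file = None
--     current_content = []
--
--     def flush():
--         nonlocal idx
--         if current_file is not None and current_content:
--             idx += 1
--             output_lines.append(f"--- Segment Group {idx} ---")
--             output_lines.append(f"[Suspicious] file: {current_file}")
--             output_lines.append("```")
--             output_lines.append("\n".join(current_content).rstrip())
--             output_lines.append("```")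
--             output_lines.append("")
--
--     for line in processed_diff.splitlines():
--         if not line.startswith("-") and not line.startswith(" ") and "/" in line:
--             flush()
--             current_file = line
--             current_content = []
--         else:
--             current_content.append(line)
--     flush()
--     return "\n".join(output_lines)
-- ===== Notes on version B (the rewrite author's own statement) =====
-- stated objective: simpler
-- what changed: Replaced the two-phase design (build a list of segment dicts, then a second enumerate loop formatting them) by one streaming pass that flushes each file group's formatted lines directly into the output with a running group counter; the redundant leading strip() guard is dropped.
import Mathlib
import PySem

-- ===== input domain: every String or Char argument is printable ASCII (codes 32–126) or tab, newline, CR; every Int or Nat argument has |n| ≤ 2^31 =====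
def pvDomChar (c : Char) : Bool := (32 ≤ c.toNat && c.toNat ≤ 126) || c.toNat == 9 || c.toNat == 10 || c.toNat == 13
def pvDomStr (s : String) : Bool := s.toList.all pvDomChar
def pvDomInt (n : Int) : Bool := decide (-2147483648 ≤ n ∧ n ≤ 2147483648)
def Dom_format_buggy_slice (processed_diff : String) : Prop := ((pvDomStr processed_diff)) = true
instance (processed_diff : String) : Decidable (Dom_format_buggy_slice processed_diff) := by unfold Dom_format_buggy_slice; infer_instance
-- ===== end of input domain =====

-- B replaces A's two-phase segments-then-format design by one streaming pass that
-- flushes each group's formatted lines directly (objective: simpler).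


-- shared by both ports: the literal header test and the literal five-line group format
-- (both Pythons contain these very expressions verbatim)
def pvHeader (line : String) : Bool :=
  !(PySem.Str.startswith line "-") && !(PySem.Str.startswith line " ") && PySem.Str.isIn "/" line

def pvFmtGroup (idx : Int) (file content : String) : List String :=
  ["--- Segment Group " ++ PySem.Int.toStr idx ++ " ---",
   "[Suspicious] file: " ++ file,
   "```",
   PySem.Str.rstrip content,
   "```",
   ""]

-- ===== PORT A =====
-- the duplicated "save the segment" block of A
def pvASave (cf : Option String) (cc : List String) (segs : List (String × String)) :
    List (String × String) :=
  match cf with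
  | some f => if cc.isEmpty then segs else segs ++ [(f, PySem.Str.join "\n" cc)]
  | none => segs

-- A's first loop: collect (file, content) segments
def pvASeg : List String → Option String → List String → List (String × String) →
    List (String × String)
  | [], cf, cc, segs => pvASave cf cc segs
  | l :: ls, cf, cc, segs =>
    if pvHeader l then pvASeg ls (some l) [] (pvASave cf cc segs)
    else pvASeg ls cf (cc ++ [l]) segs

-- A's second loop: for idx, seg in enumerate(segments, start=1)
def pvAFmt : Int → List (String × String) → List String → List String
  | _, [], out => out
  | idx, (f, c) :: rest, out => pvAFmt (idx + 1) rest (out ++ pvFmtGroup idx f c)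

def format_buggy_slice (processed_diff : String) : String :=
  if PySem.Str.strip processed_diff = "" then ""
  else
    PySem.Str.join "\n"
      (pvAFmt 1 (pvASeg (PySem.Str.splitlines processed_diff) none [] []) [])

-- ===== PORT B =====
-- B's flush(): returns the updated (idx, output_lines)
def pvFlush (idx : Int) (cf : Option String) (cc : List String) (out : List String) :
    Int × List String :=
  match cf with
  | some f =>
    if cc.isEmpty then (idx, out)
    else (idx + 1, out ++ pvFmtGroup (idx + 1) f (PySem.Str.join "\n" cc))
  | none => (idx, out)

-- B's single streaming loop
def pvBLoop : List String → Int → Option String → List String → List String → List String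
  | [], idx, cf, cc, out => (pvFlush idx cf cc out).2
  | l :: ls, idx, cf, cc, out =>
    if pvHeader l then
      pvBLoop ls (pvFlush idx cf cc out).1 (some l) [] (pvFlush idx cf cc out).2
    else pvBLoop ls idx cf (cc ++ [l]) out

def format_buggy_slice_alt (processed_diff : String) : String :=
  PySem.Str.join "\n" (pvBLoop (PySem.Str.splitlines processed_diff) 0 none [] [])

-- ===== PRECONDITION & SPEC =====
def Spec_format_buggy_slice (processed_diff : String) (out : String) : Prop :=
  out = format_buggy_slice_alt processed_diff
instance (processed_diff : String) (out : String) : Decidable (Spec_format_buggy_slice processed_diff out) := by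
  unfold Spec_format_buggy_slice; infer_instance

-- ===== CLAIM (what is proved, stated in full; the proofs are below) =====
def Claim_equal_format_buggy_slice : Prop :=
  ∀ (processed_diff : String), Dom_format_buggy_slice processed_diff →
    Spec_format_buggy_slice processed_diff (format_buggy_slice processed_diff)

-- ===== LEMMAS AND PROOFS =====

theorem pvASave_acc (cf : Option String) (cc : List String) (segs : List (String × String)) :
    pvASave cf cc segs = segs ++ pvASave cf cc [] := by
  cases cf with
  | none => simp [pvASave]
  | some f => by_cases h : cc.isEmpty <;> simp [pvASave, h]

theorem pvASeg_acc (ls : List String) :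
    ∀ (cf : Option String) (cc : List String) (segs : List (String × String)),
      pvASeg ls cf cc segs = segs ++ pvASeg ls cf cc [] := by
  induction ls with
  | nil => intro cf cc segs; simp only [pvASeg]; exact pvASave_acc cf cc segs
  | cons l ls ih =>
    intro cf cc segs
    by_cases h : pvHeader l
    · simp only [pvASeg, h, if_pos]
      rw [ih (some l) [] (pvASave cf cc segs), ih (some l) [] (pvASave cf cc []),
        pvASave_acc, List.append_assoc]
    · simp only [pvASeg, h, if_neg, Bool.false_eq_true, not_false_eq_true]
      exact ih cf (cc ++ [l]) segs

-- the streaming loop computes exactly "format A's segments from counter idx+1 onwards"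
theorem pvBLoop_eq (ls : List String) :
    ∀ (idx : Int) (cf : Option String) (cc out : List String),
      pvBLoop ls idx cf cc out = pvAFmt (idx + 1) (pvASeg ls cf cc []) out := by
  induction ls with
  | nil =>
    intro idx cf cc out
    cases cf with
    | none => simp [pvBLoop, pvFlush, pvASeg, pvASave, pvAFmt]
    | some f =>
      by_cases h : cc.isEmpty <;>
        simp [pvBLoop, pvFlush, pvASeg, pvASave, pvAFmt, h]
  | cons l ls ih =>
    intro idx cf cc out
    by_cases h : pvHeader l
    · simp only [pvBLoop, pvASeg, h, if_pos]
      rw [pvASeg_acc]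
      cases cf with
      | none => simpa [pvFlush, pvASave] using ih (idx) (some l) [] out
      | some f =>
        by_cases hc : cc.isEmpty
        · simpa [pvFlush, pvASave, hc] using ih idx (some l) [] out
        · simp only [pvFlush, pvASave, hc, if_neg, Bool.false_eq_true, not_false_eq_true]
          rw [ih (idx + 1) (some l) []]
          simp [pvAFmt]
    · simp only [pvBLoop, pvASeg, h, if_neg, Bool.false_eq_true, not_false_eq_true]
      exact ih idx cf (cc ++ [l]) out

-- if no line is a header line, A collects no segments
theorem pvASeg_noheader (ls : List String) :
    ∀ (cc : List String) (segs : List (String × String)),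
      (∀ l ∈ ls, pvHeader l = false) → pvASeg ls none cc segs = segs := by
  induction ls with
  | nil => intro cc segs _; simp [pvASeg, pvASave]
  | cons l ls ih =>
    intro cc segs h
    have hl : pvHeader l = false := h l (by simp)
    simp only [pvASeg, hl, Bool.false_eq_true, ite_false]
    exact ih (cc ++ [l]) segs (fun x hx => h x (by simp [hx]))

-- strip(s) = "" means every character of s is whitespace
theorem strip_empty_all_space (s : String) (h : PySem.Str.strip s = "") :
    ∀ c ∈ s.toList, PySem.Chars.isspace c = true := by
  intro c hc
  have h2 : PySem.Chars.strip s.toList = [] := by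
    have := congrArg String.toList h
    simpa [PySem.Str.strip] using this
  have h3 : ∀ x ∈ PySem.Chars.lstrip s.toList, PySem.Chars.isspace x = true := by
    intro x hx
    have : List.dropWhile PySem.Chars.isspace (PySem.Chars.lstrip s.toList).reverse = [] := by
      have := congrArg List.reverse h2
      simpa [PySem.Chars.strip, PySem.Chars.rstrip] using this
    exact List.dropWhile_eq_nil_iff.mp this x (by simpa using hx)
  rcases (List.mem_append.mp (by
      rw [List.takeWhile_append_dropWhile]; exact hc :
      c ∈ List.takeWhile PySem.Chars.isspace s.toList ++
          List.dropWhile PySem.Chars.isspace s.toList)) with h4 | h4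
  · exact List.mem_takeWhile_imp h4
  · exact h3 c (by simpa [PySem.Chars.lstrip] using h4)

-- every character of every line produced by splitlines.go satisfies p if the inputs do
theorem go_all (isB : Char → Bool) (p : Char → Bool) (s cur : List Char)
    (acc : List (List Char))
    (hs : ∀ c ∈ s, p c = true) (hc : ∀ c ∈ cur, p c = true)
    (ha : ∀ l ∈ acc, ∀ c ∈ l, p c = true) :
    ∀ l ∈ PySem.Chars.splitlines.go isB s cur acc, ∀ c ∈ l, p c = true := by
  fun_induction PySem.Chars.splitlines.go isB s cur acc with
  | case1 cur acc h =>
    intro l hl c hcl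
    exact ha l (List.mem_reverse.mp hl) c hcl
  | case2 cur acc h =>
    intro l hl c hcl
    rcases List.mem_cons.mp (List.mem_reverse.mp hl) with rfl | h2
    · exact hc c (List.mem_reverse.mp hcl)
    · exact ha l h2 c hcl
  | case3 rest cur acc ih =>
    refine ih (fun c hm => hs c (by simp [hm])) (by simp) ?_
    intro l hl
    rcases List.mem_cons.mp hl with rfl | h2
    · intro c hcl; exact hc c (List.mem_reverse.mp hcl)
    · exact ha l h2
  | case4 c rest cur acc hne hb ih =>
    refine ih (fun x hm => hs x (by simp [hm])) (by simp) ?_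
    intro l hl
    rcases List.mem_cons.mp hl with rfl | h2
    · intro x hcl; exact hc x (List.mem_reverse.mp hcl)
    · exact ha l h2
  | case5 c rest cur acc hne hb ih =>
    refine ih (fun x hm => hs x (by simp [hm])) ?_ ha
    intro x hx
    rcases List.mem_cons.mp hx with rfl | h2
    · exact hs x (by simp)
    · exact hc x h2

-- whitespace-only lines are never header lines ('/' is not whitespace)
theorem pvHeader_of_space (l : String)
    (h : ∀ c ∈ l.toList, PySem.Chars.isspace c = true) : pvHeader l = false := by
  by_contra hh
  have h1 : pvHeader l = true := by revert hh; cases pvHeader l <;> simp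
  have h2 : PySem.Str.isIn "/" l = true := by
    simp only [pvHeader, Bool.and_eq_true] at h1
    exact h1.2
  have h3 : ('/' : Char) ∈ l.toList := by
    have h4 := (PySem.Str.isIn_iff_infix _ _).mp h2
    exact h4.subset (by simp)
  have h5 := h _ h3
  exact absurd h5 (by decide)

-- ===== VERDICT (by name: the statement is the Claim_ definition above) =====
theorem format_buggy_slice_spec : Claim_equal_format_buggy_slice := by
  intro s _
  unfold Spec_format_buggy_slice
  unfold format_buggy_slice format_buggy_slice_alt
  rw [pvBLoop_eq]
  by_cases h : PySem.Str.strip s = ""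
  · rw [if_pos h]
    have hall := strip_empty_all_space s h
    have hlines : ∀ l ∈ PySem.Str.splitlines s, pvHeader l = false := by
      intro l hl
      apply pvHeader_of_space
      intro c hcl
      have hex : ∃ lc ∈ PySem.Chars.splitlines s.toList, String.ofList lc = l := by
        simpa [PySem.Str.splitlines] using hl
      rcases hex with ⟨lc, hlc, rfl⟩
      have := go_all _ PySem.Chars.isspace s.toList [] [] hall (by simp) (by simp) lc
        (by simpa [PySem.Chars.splitlines] using hlc)
      exact this c (by simpa using hcl)
    rw [pvASeg_noheader _ _ _ hlines]
    simp [pvAFmt, PySem.Str.join, PySem.Chars.join, List.intercalate]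
  · rw [if_neg h]
    norm_num
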